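-- pv_equiv track=rewrite | github.com/jollyra/advent-of-code | 2017/eleven.py | get_cube_coord_from_path
-- ===== SOURCE A (Python) =====
-- from collections import namedtuple
--
-- Cube = namedtuple('CubeCoordinate', 'x, y, z')
--
-- def get_cube_coord_from_path(path):
--     directions = {'ne': 0, 'se': 0, 's': 0, 'sw': 0, 'nw': 0, 'n': 0}
--     for d in path:
--         directions[d] += 1
--
--     x = directions['ne'] + directions['se'] - directions['nw'] - directions['sw']
--     y = directions['sw'] + directions['s'] - directions['ne'] - directions['n']
--     z = directions['nw'] + directions['n'] - directions['se'] - directions['s']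
--     cube = Cube(x=x, y=y, z=z)
--     return cube
-- ===== SOURCE B (Python) =====
-- from collections import namedtuple
--
-- Cube = namedtuple('CubeCoordinate', 'x, y, z')
--
-- DELTAS = {'ne': (1, -1, 0), 'se': (1, 0, -1), 's': (0, 1, -1),
--           'sw': (-1, 1, 0), 'nw': (-1, 0, 1), 'n': (0, -1, 1)}
--
--
-- def _solve(seg):
--     # divide and conquer: the cube coordinate of a path is the componentwise
--     # sum of the coordinates of its two halves
--     if not seg:
--         return (0, 0, 0)
--     if len(seg) == 1:
--         return DELTAS[seg[0]]
--     mid = len(seg) // 2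
--     ax, ay, az = _solve(seg[:mid])
--     bx, by, bz = _solve(seg[mid:])
--     return (ax + bx, ay + by, az + bz)
--
--
-- def get_cube_coord_from_path(path):
--     x, y, z = _solve(list(path))
--     return Cube(x=x, y=y, z=z)
-- ===== Notes on version B (the rewrite author's own statement) =====
-- stated objective: alternative
-- what changed: B computes the coordinate by divide and conquer: it recursively splits the path in half, solves each half, and adds the two half-coordinates componentwise (coordinates are additive over path concatenation), instead of A's single linear pass tallying a counts dict followed by an arithmetic phase.
import Mathlib
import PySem

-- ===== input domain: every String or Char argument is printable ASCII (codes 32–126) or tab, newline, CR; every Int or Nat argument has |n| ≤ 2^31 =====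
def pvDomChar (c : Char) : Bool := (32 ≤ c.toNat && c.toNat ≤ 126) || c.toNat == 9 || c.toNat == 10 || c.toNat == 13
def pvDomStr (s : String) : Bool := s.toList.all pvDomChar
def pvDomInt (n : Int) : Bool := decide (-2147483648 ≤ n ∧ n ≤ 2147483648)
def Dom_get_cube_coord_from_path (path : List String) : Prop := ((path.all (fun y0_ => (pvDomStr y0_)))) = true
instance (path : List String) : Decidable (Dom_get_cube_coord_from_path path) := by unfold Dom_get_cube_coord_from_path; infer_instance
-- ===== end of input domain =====

-- B replaces A's counts-dict-then-arithmetic linear pass with divide and conquer: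
-- split the path in half, solve the halves recursively, add the half-coordinates
-- (objective: alternative algorithm; not faster).

-- ===== PORT A =====
def get_cube_coord_from_path (path : List String) : Int × Int × Int :=
  let directions : PySem.Dict String Int :=
    PySem.Dict.ofList [("ne", 0), ("se", 0), ("s", 0), ("sw", 0), ("nw", 0), ("n", 0)]
  let directions := path.foldl (fun d s => d.modify s 0 (· + 1)) directions
  let x := directions.getD "ne" 0 + directions.getD "se" 0 - directions.getD "nw" 0 - directions.getD "sw" 0
  let y := directions.getD "sw" 0 + directions.getD "s" 0 - directions.getD "ne" 0 - directions.getD "n" 0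
  let z := directions.getD "nw" 0 + directions.getD "n" 0 - directions.getD "se" 0 - directions.getD "s" 0
  (x, y, z)

-- ===== PORT B =====
-- delta table; the (0,0,0) default is never reached inside Pre_ (Python B raises KeyError there)
def pvDelta (s : String) : Int × Int × Int :=
  if s = "ne" then (1, -1, 0)
  else if s = "se" then (1, 0, -1)
  else if s = "s" then (0, 1, -1)
  else if s = "sw" then (-1, 1, 0)
  else if s = "nw" then (-1, 0, 1)
  else if s = "n" then (0, -1, 1)
  else (0, 0, 0)

-- divide and conquer on the path (Source B's _solve)
def pvSolve : List String → Int × Int × Int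
  | [] => (0, 0, 0)
  | [s] => pvDelta s
  | x :: y :: rest =>
    let mid := (x :: y :: rest).length / 2
    let a := pvSolve ((x :: y :: rest).take mid)
    let b := pvSolve ((x :: y :: rest).drop mid)
    (a.1 + b.1, a.2.1 + b.2.1, a.2.2 + b.2.2)
termination_by l => l.length
decreasing_by
  · simp; omega
  · simp; omega

def get_cube_coord_from_path_alt (path : List String) : Int × Int × Int :=
  pvSolve path

-- ===== PRECONDITION & SPEC =====
-- Pre_ admits exactly the paths of valid direction names; on any other step A raises KeyError.
def Pre_get_cube_coord_from_path (path : List String) : Prop :=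
  ∀ s ∈ path, s ∈ ["ne", "se", "s", "sw", "nw", "n"]
instance (path : List String) : Decidable (Pre_get_cube_coord_from_path path) := by
  unfold Pre_get_cube_coord_from_path; infer_instance
def pvWitness_get_cube_coord_from_path : List String := ["ne", "s", "s", "nw"]

def Spec_get_cube_coord_from_path (path : List String) (out : Int × Int × Int) : Prop := out = get_cube_coord_from_path_alt path
instance (path : List String) (out : Int × Int × Int) : Decidable (Spec_get_cube_coord_from_path path out) := by unfold Spec_get_cube_coord_from_path; infer_instance

-- ===== CLAIM (what is proved, stated in full; the proofs are below) =====
def Claim_equal_get_cube_coord_from_path : Prop := ∀ (path : List String), Dom_get_cube_coord_from_path path → Pre_get_cube_coord_from_path path → Spec_get_cube_coord_from_path path (get_cube_coord_from_path path)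

-- ===== LEMMAS AND PROOFS =====

-- the count-based closed form of a path's cube coordinate
def pvCounts (l : List String) : Int × Int × Int :=
  (l.count "ne" + l.count "se" - l.count "nw" - l.count "sw",
   l.count "sw" + l.count "s" - l.count "ne" - l.count "n",
   l.count "nw" + l.count "n" - l.count "se" - l.count "s")

-- counts (hence coordinates) are additive over concatenation
theorem pvCounts_append (l r : List String) :
    pvCounts (l ++ r) = ((pvCounts l).1 + (pvCounts r).1,
      (pvCounts l).2.1 + (pvCounts r).2.1, (pvCounts l).2.2 + (pvCounts r).2.2) := by
  simp only [pvCounts, List.count_append]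
  refine Prod.ext ?_ (Prod.ext ?_ ?_) <;> push_cast <;> ring

-- B's divide and conquer equals the count form (counts are additive over take ++ drop)
theorem solve_counts (l : List String)
    (h : ∀ s ∈ l, s ∈ ["ne", "se", "s", "sw", "nw", "n"]) :
    pvSolve l = pvCounts l := by
  fun_induction pvSolve l with
  | case1 => simp [pvCounts]
  | case2 s =>
    have hs := h s (by simp)
    fin_cases hs <;> simp [pvDelta, pvCounts]
  | case3 a b rest mid x y ih1 ih2 =>
    have ht : ∀ s ∈ (a :: b :: rest).take mid, s ∈ ["ne", "se", "s", "sw", "nw", "n"] :=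
      fun s hs => h s (List.take_subset _ _ hs)
    have hd : ∀ s ∈ (a :: b :: rest).drop mid, s ∈ ["ne", "se", "s", "sw", "nw", "n"] :=
      fun s hs => h s (List.drop_subset _ _ hs)
    have hx : x = pvSolve ((a :: b :: rest).take mid) := rfl
    have hy : y = pvSolve ((a :: b :: rest).drop mid) := rfl
    rw [hx, hy, ih1 ht, ih2 hd]
    conv_rhs => rw [← List.take_append_drop mid (a :: b :: rest)]
    rw [pvCounts_append]

theorem get_cube_coord_from_path_spec : Claim_equal_get_cube_coord_from_path := by
  intro path _ hpre
  unfold Spec_get_cube_coord_from_path get_cube_coord_from_path get_cube_coord_from_path_alt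
  rw [solve_counts path hpre]
  simp only [PySem.Dict.getD_foldl_modify_add_one]
  have h1 : (PySem.Dict.ofList ([("ne", 0), ("se", 0), ("s", 0), ("sw", 0), ("nw", 0), ("n", 0)] : List (String × Int))).getD "ne" 0 = 0 := by decide
  have h2 : (PySem.Dict.ofList ([("ne", 0), ("se", 0), ("s", 0), ("sw", 0), ("nw", 0), ("n", 0)] : List (String × Int))).getD "se" 0 = 0 := by decide
  have h3 : (PySem.Dict.ofList ([("ne", 0), ("se", 0), ("s", 0), ("sw", 0), ("nw", 0), ("n", 0)] : List (String × Int))).getD "s" 0 = 0 := by decide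
  have h4 : (PySem.Dict.ofList ([("ne", 0), ("se", 0), ("s", 0), ("sw", 0), ("nw", 0), ("n", 0)] : List (String × Int))).getD "sw" 0 = 0 := by decide
  have h5 : (PySem.Dict.ofList ([("ne", 0), ("se", 0), ("s", 0), ("sw", 0), ("nw", 0), ("n", 0)] : List (String × Int))).getD "nw" 0 = 0 := by decide
  have h6 : (PySem.Dict.ofList ([("ne", 0), ("se", 0), ("s", 0), ("sw", 0), ("nw", 0), ("n", 0)] : List (String × Int))).getD "n" 0 = 0 := by decide
  rw [h1, h2, h3, h4, h5, h6]
  simp only [pvCounts]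
  refine Prod.ext ?_ (Prod.ext ?_ ?_) <;> push_cast <;> ring
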